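-- pv_equiv track=rewrite | github.com/pypi-data/pypi-mirror-366 | packages/mapFolding/mapfolding-0.14.0.tar.gz/mapfolding-0.14.0/mapFolding/reference/A005316redis.py | initializeA000682
-- ===== SOURCE A (Python) =====
-- def initializeA000682(n: int) -> dict[int, int]:
-- 	stateToCount: dict[int, int] = {}
--
-- 	curveLocationsMAXIMUM = 1 << (2 * n + 4)
--
-- 	bitPattern = 5 - (n & 1) * 4
--
-- 	packedState = bitPattern | (bitPattern << 1)
-- 	while packedState < curveLocationsMAXIMUM:
-- 		stateToCount[packedState] = 1
-- 		bitPattern = ((bitPattern << 4) | 0b0101)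
-- 		packedState = bitPattern | (bitPattern << 1)
--
-- 	return stateToCount
-- ===== SOURCE B (Python) =====
-- def initializeA000682(n: int) -> dict[int, int]:
--     # The largest stored state is always (1 << (2*n + 4)) - 1; each earlier state
--     # is that mask shifted right by 4.  Walk DOWN from the maximum collecting the
--     # keys on a stack, then pop them into the dict in ascending order.
--     key = (1 << (2 * n + 4)) - 1
--     stack = []
--     while key:
--         stack.append(key)
--         key >>= 4
--     stateToCount: dict[int, int] = {}
--     while stack:
--         stateToCount[stack.pop()] = 1
--     return stateToCount
-- ===== Notes on version B (the rewrite author's own statement) =====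
-- stated objective: alternative
-- what changed: Instead of A's upward loop threading a bitPattern accumulator through (<<4)|0b0101 updates and packing each state, B starts from the largest state, the solid mask (1<<(2n+4))-1, walks DOWN by key >>= 4 pushing the keys on a stack, and then pops the stack into the dict, with no parity branch and no accumulator.
import Mathlib
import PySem

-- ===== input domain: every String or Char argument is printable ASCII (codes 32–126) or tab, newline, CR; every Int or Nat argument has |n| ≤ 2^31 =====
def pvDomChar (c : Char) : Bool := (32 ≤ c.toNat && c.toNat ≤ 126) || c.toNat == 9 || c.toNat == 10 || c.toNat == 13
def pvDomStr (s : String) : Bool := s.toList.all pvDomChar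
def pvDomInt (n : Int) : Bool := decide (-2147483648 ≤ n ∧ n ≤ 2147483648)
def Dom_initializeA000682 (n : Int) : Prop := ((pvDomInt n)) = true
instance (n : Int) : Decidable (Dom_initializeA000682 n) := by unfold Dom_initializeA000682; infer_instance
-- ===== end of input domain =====

-- B starts from the largest state, the solid mask (1<<(2n+4))-1, walks down by key >>= 4 onto a stack,
-- then pops the stack into the dict — no parity branch, no bitPattern accumulator (objective: alternative).

-- ===== PORT A =====
-- while loop ported with a fuel counter that only makes the recursion total; the fuel is never exhausted
-- on inputs satisfying Pre_ (proved below).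
def initA_loop (fuel : Nat) (maxi bp : Int) (d : PySem.Dict Int Int) : PySem.Dict Int Int :=
  match fuel with
  | 0 => d
  | fuel+1 =>
    let packedState := PySem.Int.bor bp (bp <<< (1:Nat))
    if packedState < maxi then
      initA_loop fuel maxi (PySem.Int.bor (bp <<< (4:Nat)) 5) (d.insert packedState 1)
    else d

def initializeA000682 (n : Int) : List (Int × Int) :=
  let stateToCount : PySem.Dict Int Int := PySem.Dict.empty
  let curveLocationsMAXIMUM : Int := 1 <<< (2*n+4).toNat   -- Python raises for 2n+4 < 0: excluded by Pre_
  let bitPattern : Int := 5 - (PySem.Int.band n 1) * 4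
  (initA_loop (2*n+6).toNat curveLocationsMAXIMUM bitPattern stateToCount).items

-- ===== PORT B =====
-- 'while key: stack.append(key); key >>= 4' ported with fuel that only makes the recursion total
def altDown (fuel : Nat) (key : Int) (stack : List Int) : List Int :=
  match fuel with
  | 0 => stack
  | fuel+1 => if key ≠ 0 then altDown fuel (key >>> (4:Nat)) (stack ++ [key]) else stack

def initializeA000682_alt (n : Int) : List (Int × Int) :=
  let key : Int := 1 <<< (2*n+4).toNat - 1    -- Python raises for 2n+4 < 0: excluded by Pre_
  let stack : List Int := altDown (2*n+6).toNat key []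
  -- 'while stack: stateToCount[stack.pop()] = 1' = inserting the stack's elements back to front
  (stack.reverse.foldl (fun d k => d.insert k 1) (PySem.Dict.empty : PySem.Dict Int Int)).items

-- ===== PRECONDITION & SPEC =====
-- A raises ValueError ('negative shift count') for n ≤ -3 (and so does B); Pre_ excludes exactly those inputs.
def Pre_initializeA000682 (n : Int) : Prop := -2 ≤ n
instance (n : Int) : Decidable (Pre_initializeA000682 n) := by unfold Pre_initializeA000682; infer_instance
def pvWitness_initializeA000682 : Int := 2

def Spec_initializeA000682 (n : Int) (out : List (Int × Int)) : Prop := out = initializeA000682_alt n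
instance (n : Int) (out : List (Int × Int)) : Decidable (Spec_initializeA000682 n out) := by unfold Spec_initializeA000682; infer_instance

-- ===== CLAIM (what is proved, stated in full; the proofs are below) =====
def Claim_equal_initializeA000682 : Prop := ∀ (n : Int), Dom_initializeA000682 n → Pre_initializeA000682 n → Spec_initializeA000682 n (initializeA000682 n)

-- ===== LEMMAS AND PROOFS =====

-- pvA j = A's bitPattern after j "bits" have been laid down: 0, 1, 5, 21, … (binary 0101…01, j ones)
def pvA : Nat → Nat
  | 0 => 0
  | j+1 => 4 * pvA j + 1

lemma pvA_testBit (j i : Nat) : (pvA j).testBit i = (decide (i < 2*j) && decide (i % 2 = 0)) := by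
  induction j generalizing i with
  | zero => simp [pvA]
  | succ j ih =>
    match i with
    | 0 => simp [pvA, Nat.testBit_zero]; omega
    | 1 => simp [pvA, Nat.testBit_succ, Nat.testBit_zero]; omega
    | (i+2) =>
      have h2 : (4 * pvA j + 1) / 2 / 2 = pvA j := by omega
      simp only [pvA, Nat.testBit_succ, h2, ih]
      congr 1 <;> rw [decide_eq_decide] <;> omega

lemma pvF1 (j : Nat) : pvA j ||| (pvA j <<< 1) = 2^(2*j) - 1 := by
  apply Nat.eq_of_testBit_eq
  intro i
  simp only [Nat.testBit_or, Nat.testBit_shiftLeft, pvA_testBit, Nat.testBit_two_pow_sub_one,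
    ← Bool.decide_and, ← Bool.decide_or]
  rw [decide_eq_decide]
  omega

lemma pvF2 (j : Nat) : (pvA j <<< 4) ||| 5 = pvA (j+2) := by
  apply Nat.eq_of_testBit_eq
  intro i
  rw [show (5:Nat) = pvA 2 from rfl]
  simp only [Nat.testBit_or, Nat.testBit_shiftLeft, pvA_testBit, ← Bool.decide_and, ← Bool.decide_or]
  rw [decide_eq_decide]
  omega

lemma pvCast_shift (a : Nat) (k : Nat) : ((a:Int) <<< k) = ((a <<< k : Nat) : Int) := by
  rw [Int.shiftLeft_eq, Nat.shiftLeft_eq]; push_cast; ring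

-- the packedState laid down at step j, as an Int
lemma pvPack (j : Nat) :
    PySem.Int.bor ((pvA j : Nat) : Int) (((pvA j : Nat) : Int) <<< (1:Nat)) = ((2:Int)^(2*j) - 1) := by
  rw [pvCast_shift, PySem.Int.bor_natCast, pvF1]
  have h1 : 1 ≤ 2^(2*j) := Nat.one_le_two_pow
  push_cast [h1]
  ring

lemma pvStep (j : Nat) :
    PySem.Int.bor (((pvA j : Nat) : Int) <<< (4:Nat)) 5 = ((pvA (j+2) : Nat) : Int) := by
  rw [pvCast_shift, show (5:Int) = ((5:Nat):Int) from rfl, PySem.Int.bor_natCast, pvF2]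

-- the list of entries produced from step j on, c iterations
def pvTarget (j c : Nat) : List (Int × Int) := (List.range c).map (fun t => ((2:Int)^(2*j + 4*t) - 1, 1))

def pvCnt (j N : Nat) : Nat := if 2*j ≤ N then (N - 2*j)/4 + 1 else 0

lemma pvTarget_succ (j c : Nat) :
    pvTarget j (c+1) = ((2:Int)^(2*j) - 1, 1) :: pvTarget (j+2) c := by
  have h : ∀ t : Nat, 2*j + 4*(t+1) = 2*(j+2) + 4*t := by omega
  simp [pvTarget, List.range_succ_eq_map, List.map_map, Function.comp_def, h]

lemma pvPow_lt_pow (a b : Nat) (h : a < b) : (2:Int)^a - 1 < (2:Int)^b - 1 := by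
  have := pow_lt_pow_right₀ (a := (2:Int)) (by norm_num) h
  omega

lemma pvLoop_eq (fuel : Nat) : ∀ (j N : Nat), 1 ≤ j → N < 2*j + 2*fuel →
    ∀ (d : PySem.Dict Int Int), (∀ p ∈ d.items, p.1 < (2:Int)^(2*j) - 1) →
    (initA_loop fuel ((2:Int)^N) ((pvA j : Nat) : Int) d).items
      = d.items ++ pvTarget j (pvCnt j N) := by
  induction fuel with
  | zero =>
    intro j N hj hfu d hd
    have : pvCnt j N = 0 := by unfold pvCnt; rw [if_neg]; omega
    simp [initA_loop, this, pvTarget]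
  | succ fuel ih =>
    intro j N hj hfu d hd
    rw [initA_loop]
    simp only [pvPack]
    by_cases hc : 2*j ≤ N
    · have hcond : (2:Int)^(2*j) - 1 < (2:Int)^N := by
        have := pow_le_pow_right₀ (a := (2:Int)) (by norm_num) hc
        omega
      rw [if_pos hcond, pvStep]
      have hnc : d.contains ((2:Int)^(2*j) - 1) = false := by
        rw [← Bool.not_eq_true, PySem.Dict.contains_iff_mem_keys]
        intro hmem
        simp only [PySem.Dict.keys, List.mem_map] at hmem
        obtain ⟨p, hp, hpe⟩ := hmem
        have := hd p hp
        omega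
      have hcnt : pvCnt j N = pvCnt (j+2) N + 1 := by
        unfold pvCnt
        rw [if_pos hc]
        by_cases h4 : 2*(j+2) ≤ N
        · rw [if_pos h4]; omega
        · rw [if_neg h4]; omega
      have hd' : ∀ p ∈ (d.insert ((2:Int)^(2*j) - 1) 1).items, p.1 < (2:Int)^(2*(j+2)) - 1 := by
        intro p hp
        rw [PySem.Dict.items_insert_of_not_contains _ _ hnc] at hp
        rcases List.mem_append.mp hp with h | h
        · exact lt_trans (hd p h) (pvPow_lt_pow _ _ (by omega))
        · simp at h
          rw [h]
          exact pvPow_lt_pow (2*j) (2*(j+2)) (by omega)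
      rw [ih (j+2) N (by omega) (by omega) _ hd', hcnt, pvTarget_succ,
        PySem.Dict.items_insert_of_not_contains _ _ hnc]
      simp
    · have hcond : ¬ ((2:Int)^(2*j) - 1 < (2:Int)^N) := by
        have := pow_le_pow_right₀ (a := (2:Int)) (by norm_num) (show N ≤ 2*j - 1 by omega)
        have h2 : (2:Int)^(2*j-1) < (2:Int)^(2*j) := pow_lt_pow_right₀ (by norm_num) (by omega)
        omega
      rw [if_neg hcond]
      have hz : pvCnt j N = 0 := by unfold pvCnt; rw [if_neg hc]
      simp [hz, pvTarget]

-- ---- B side ----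

-- the mask 2^m - 1 shifted right by 4 is the next smaller mask (Nat subtraction handles m < 4)
lemma pvShiftMask (m : Nat) : ((2:Int)^m - 1) >>> (4:Nat) = (2:Int)^(m-4) - 1 := by
  have h1 : (1:Nat) ≤ 2^m := Nat.one_le_two_pow
  have hcast : ((2:Int)^m - 1) = (((2^m - 1 : Nat)) : Int) := by push_cast [h1]; ring
  rw [hcast, show ((((2:Nat)^m - 1 : Nat)) : Int) >>> (4:Nat)
      = (((2^m - 1 : Nat) >>> 4 : Nat) : Int) from rfl]
  rw [Nat.shiftRight_eq_div_pow]
  by_cases hm : 4 ≤ m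
  · have h2 : (2:Nat)^m = 2^4 * 2^(m-4) := by rw [← pow_add]; congr 1; omega
    have h3 : (1:Nat) ≤ 2^(m-4) := Nat.one_le_two_pow
    have h4 : ((2:Nat)^m - 1) / 2^4 = 2^(m-4) - 1 := by omega
    rw [h4]; push_cast [h3]; ring
  · have h2 : (2:Nat)^m ≤ 2^4 := Nat.pow_le_pow_right (by norm_num) (by omega)
    have h3 : m - 4 = 0 := by omega
    have h4 : ((2:Nat)^m - 1) / 2^4 = 0 := Nat.div_eq_of_lt (by omega)
    rw [h4, h3]; norm_num

-- the descending chain of masks pushed on the stack, starting at 2^m - 1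
def pvDesc : Nat → List Int
  | 0 => []
  | (m+1) => ((2:Int)^(m+1) - 1) :: pvDesc (m - 3)

lemma pvDown_eq (fuel : Nat) : ∀ (m : Nat), m < fuel → ∀ (stack : List Int),
    altDown fuel ((2:Int)^m - 1) stack = stack ++ pvDesc m := by
  induction fuel with
  | zero => intro m hm; omega
  | succ fuel ih =>
    intro m hm stack
    match m with
    | 0 => simp [altDown, pvDesc]
    | (m'+1) =>
      have hne : ((2:Int)^(m'+1) - 1) ≠ 0 := by
        have := pow_lt_pow_right₀ (a := (2:Int)) (by norm_num) (show 0 < m'+1 by omega)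
        simp at this ⊢
        omega
      rw [altDown, if_pos hne, pvShiftMask]
      rw [ih (m'+1-4) (by omega), show m'+1-4 = m'-3 by omega, pvDesc]
      simp

lemma pvDesc_eq (j c : Nat) (hj : j = 1 ∨ j = 2) :
    pvDesc (2*j + 4*c) = ((pvTarget j (c+1)).map Prod.fst).reverse := by
  induction c with
  | zero =>
    rcases hj with h | h <;> subst h <;>
      simp [pvDesc, pvTarget, List.range_succ]
  | succ c ih =>
    have h1 : 2*j + 4*(c+1) = (2*j + 4*c + 3) + 1 := by omega
    have h2 : (2*j + 4*c + 3) - 3 = 2*j + 4*c := by omega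
    rw [h1, pvDesc, h2, ih]
    have h3 : pvTarget j (c+1+1) = pvTarget j (c+1) ++ [((2:Int)^(2*j + 4*(c+1)) - 1, 1)] := by
      simp [pvTarget, List.range_succ]
    rw [h3]
    simp [h1]

lemma pvKeysNodup (j c : Nat) : ((pvTarget j c).map Prod.fst).Nodup := by
  unfold pvTarget
  rw [List.map_map]
  refine List.Nodup.map ?_ (List.nodup_range)
  intro a b hab
  simp only [Function.comp] at hab
  have h2 : (2:Int)^(2*j+4*a) = (2:Int)^(2*j+4*b) := by omega
  have h3 : (2:Nat)^(2*j+4*a) = (2:Nat)^(2*j+4*b) := by exact_mod_cast h2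
  have := Nat.pow_right_injective (by norm_num) h3
  omega

lemma pvFold_eq (j c : Nat) :
    ((((pvTarget j c).map Prod.fst).foldl
      (fun d k => d.insert k 1) (PySem.Dict.empty : PySem.Dict Int Int))).items
      = pvTarget j c := by
  rw [List.foldl_map]
  rw [PySem.Dict.items_foldl_insert_fresh _ _ _ _ (fun a _ => PySem.Dict.contains_empty _)
    (pvKeysNodup j c)]
  simp only [PySem.Dict.empty, List.nil_append]
  unfold pvTarget
  simp [List.map_map, Function.comp_def]

lemma pvBand_parity (n : Int) : PySem.Int.band n 1 = if n % 2 = 0 then 0 else 1 := by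
  rw [PySem.Int.band_one, PySem.Int.mod_eq_emod_of_pos (by norm_num)]
  omega

lemma pvMain (n : Int) (j c : Nat) (hj : j = 1 ∨ j = 2) (hpre : -2 ≤ n)
    (hN : (2*n+4).toNat = 2*j + 4*c)
    (hbp : 5 - (PySem.Int.band n 1) * 4 = ((pvA j : Nat) : Int)) :
    initializeA000682 n = initializeA000682_alt n := by
  have hj1 : 1 ≤ j := by omega
  set N : Nat := (2*n+4).toNat with hNdef
  simp only [initializeA000682, initializeA000682_alt]
  rw [hbp]
  have hsh : ((1 <<< N : Nat) : Int) = (2:Int)^N := by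
    push_cast [Nat.shiftLeft_eq]; ring
  rw [hsh, pvLoop_eq ((2*n+6).toNat) j N hj1 (by omega) PySem.Dict.empty
    (by intro p hp; simp [PySem.Dict.empty] at hp)]
  rw [pvDown_eq ((2*n+6).toNat) N (by omega), List.nil_append, hN,
    pvDesc_eq j c hj, List.reverse_reverse, pvFold_eq]
  have hcnt : pvCnt j (2*j + 4*c) = c + 1 := by
    unfold pvCnt
    rw [if_pos (by omega)]
    omega
  rw [hcnt]
  simp [PySem.Dict.empty]

theorem initializeA000682_spec : Claim_equal_initializeA000682 := by
  intro n _ hpre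
  unfold Pre_initializeA000682 at hpre
  unfold Spec_initializeA000682
  by_cases hn2 : n = -2
  · subst hn2; decide
  · have hb := pvBand_parity n
    by_cases hpar : n % 2 = 0
    · rw [if_pos hpar] at hb
      obtain ⟨k, hk⟩ : ∃ k : Int, n = 2*k := ⟨n/2, by omega⟩
      refine pvMain n 2 ((2*n).toNat/4) (Or.inr rfl) hpre (by omega)
        (by rw [hb]; norm_num [pvA])
    · rw [if_neg hpar] at hb
      obtain ⟨k, hk⟩ : ∃ k : Int, n = 2*k+1 := ⟨n/2, by omega⟩
      refine pvMain n 1 ((2*n+2).toNat/4) (Or.inl rfl) hpre (by omega)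
        (by rw [hb]; norm_num [pvA])
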